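-- pv_equiv track=rewrite | github.com/lucascverissim0/icor-webapp | scripts/wikipedia_gen.py | _pick_window_for_year
-- ===== SOURCE A (Python) =====
-- from typing import Optional, Tuple, List, Dict
--
-- def _pick_window_for_year(payload: dict, year: int) -> Optional[dict]:
--     wins = payload.get("windows") or []
--     if not wins:
--         return None
--     covering = [w for w in wins if w["start"] <= year <= (w["end"] if w["end"] != 9999 else 9999)]
--     if covering:
--         covering.sort(key=lambda w: (((w["end"] if w["end"] != 9999 else 9999) - w["start"]), -w["start"]))
--         return covering[0]
--
--     def dist(w):
--         s, e = w["start"], (w["end"] if w["end"] != 9999 else 9999)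
--         if year < s: return s - year
--         if year > e: return year - e
--         return 0
--
--     wins_sorted = sorted(wins, key=lambda w: (dist(w), -w["start"]))
--     return wins_sorted[0] if wins_sorted else None
-- ===== SOURCE B (Python) =====
-- def _pick_window_for_year(payload, year):
--     wins = payload.get("windows") or []
--     best = None
--     best_key = None
--     for w in wins:
--         s, e = w["start"], w["end"]
--         if s <= year <= e:
--             k = (0, e - s, -s)
--         else:
--             k = (1, s - year if year < s else year - e, -s)
--         if best is None or k < best_key:
--             best, best_key = w, k
--     return best
-- ===== Notes on version B (the rewrite author's own statement) =====
-- stated objective: alternative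
-- what changed: A filters covering windows and runs one of two stable sorts (covering by (size, -start), otherwise all windows by (clamp-distance, -start)) and takes the head; B makes a single argmin pass over all windows with one composite (covering-flag, size-or-distance, -start) key, so the filter, both sorts and the branch disappear.
import Mathlib
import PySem

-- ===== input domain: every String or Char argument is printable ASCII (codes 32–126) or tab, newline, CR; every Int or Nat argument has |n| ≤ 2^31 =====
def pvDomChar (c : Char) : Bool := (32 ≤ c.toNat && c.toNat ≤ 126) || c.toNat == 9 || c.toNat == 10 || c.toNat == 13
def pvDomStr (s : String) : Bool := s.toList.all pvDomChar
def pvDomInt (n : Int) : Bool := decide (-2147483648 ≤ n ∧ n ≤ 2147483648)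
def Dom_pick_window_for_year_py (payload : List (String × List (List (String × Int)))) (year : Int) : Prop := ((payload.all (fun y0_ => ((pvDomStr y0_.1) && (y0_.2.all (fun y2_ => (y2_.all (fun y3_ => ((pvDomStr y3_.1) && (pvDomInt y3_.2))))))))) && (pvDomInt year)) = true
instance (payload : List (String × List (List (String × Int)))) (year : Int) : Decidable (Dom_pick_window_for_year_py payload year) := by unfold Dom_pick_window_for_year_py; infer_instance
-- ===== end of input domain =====

-- B replaces A's two-phase covering-filter + two stable sorts by ONE pass keeping the first
-- window minimal under a composite (covering-flag, size-or-distance, -start) key (objective: alternative).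

-- ===== PORT A =====
-- dict lookup w[k] (first match); Pre_ guarantees the key is present, so the default is never the result
def pvGetI (w : List (String × Int)) (k : String) : Int :=
  ((PySem.Dict.mk w).get? k).getD 0

-- (w["end"] if w["end"] != 9999 else 9999)
def pvEnd (w : List (String × Int)) : Int :=
  if pvGetI w "end" ≠ 9999 then pvGetI w "end" else 9999

-- w["start"] <= year <= (w["end"] if w["end"] != 9999 else 9999)
def pvCov (year : Int) (w : List (String × Int)) : Bool :=
  decide (pvGetI w "start" ≤ year) && decide (year ≤ pvEnd w)

-- the local helper dist(w) of A
def pvDist (year : Int) (w : List (String × Int)) : Int :=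
  let s := pvGetI w "start"
  let e := pvEnd w
  if year < s then s - year else if year > e then year - e else 0

def pick_window_for_year_py (payload : List (String × List (List (String × Int)))) (year : Int) : Option (List (String × Int)) :=
  let wins := ((PySem.Dict.mk payload).get? "windows").getD []
  if wins = [] then none
  else
    let covering := wins.filter (fun w => pvCov year w)
    if covering = [] then
      (PySem.List.sorted2 wins (fun w => pvDist year w) (fun w => -pvGetI w "start") false).head?
    else
      (PySem.List.sorted2 covering (fun w => pvEnd w - pvGetI w "start") (fun w => -pvGetI w "start") false).head?

-- ===== PORT B =====
-- composite key: (0, e-s, -s) for a covering window, (1, clamp distance, -s) otherwise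
def pvKeyB (year : Int) (w : List (String × Int)) : Int × Int × Int :=
  let s := pvGetI w "start"
  let e := pvGetI w "end"
  if s ≤ year ∧ year ≤ e then (0, e - s, -s)
  else (1, if year < s then s - year else year - e, -s)

-- Python's `<` on int 3-tuples (strict lexicographic)
def pvLt3 (a b : Int × Int × Int) : Bool :=
  decide (a.1 < b.1) || (decide (a.1 = b.1) &&
    (decide (a.2.1 < b.2.1) || (decide (a.2.1 = b.2.1) && decide (a.2.2 < b.2.2))))

-- loop body of B: keep the incumbent unless the new window's key is strictly smaller
def pvStepB (year : Int) (acc : Option (List (String × Int) × (Int × Int × Int))) (w : List (String × Int)) : Option (List (String × Int) × (Int × Int × Int)) :=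
  let k := pvKeyB year w
  match acc with
  | none => some (w, k)
  | some (_, bk) => if pvLt3 k bk then some (w, k) else acc

def pick_window_for_year_py_alt (payload : List (String × List (List (String × Int)))) (year : Int) : Option (List (String × Int)) :=
  let wins := ((PySem.Dict.mk payload).get? "windows").getD []
  (wins.foldl (pvStepB year) none).map (fun p => p.1)

-- ===== PRECONDITION & SPEC =====
-- Pre_ excludes inputs where some listed window lacks a "start" or "end" key: there A raises
-- KeyError on almost all of them (and B always does); on the rare shapes where A's short-circuit
-- skips a missing "end", B raises, so those inputs are excluded too (see cites).
def Pre_pick_window_for_year_py (payload : List (String × List (List (String × Int)))) (year : Int) : Prop :=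
  ∀ w ∈ ((PySem.Dict.mk payload).get? "windows").getD [],
    ((PySem.Dict.mk w).get? "start").isSome = true ∧ ((PySem.Dict.mk w).get? "end").isSome = true
instance (payload : List (String × List (List (String × Int)))) (year : Int) : Decidable (Pre_pick_window_for_year_py payload year) := by unfold Pre_pick_window_for_year_py; infer_instance

def pvWitness_pick_window_for_year_py : (List (String × List (List (String × Int)))) × Int :=
  ([("windows", [[("start", 1990), ("end", 2000)], [("start", 2005), ("end", 9999)]])], 1995)

def Spec_pick_window_for_year_py (payload : List (String × List (List (String × Int)))) (year : Int) (out : Option (List (String × Int))) : Prop := out = pick_window_for_year_py_alt payload year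
instance (payload : List (String × List (List (String × Int)))) (year : Int) (out : Option (List (String × Int))) : Decidable (Spec_pick_window_for_year_py payload year out) := by unfold Spec_pick_window_for_year_py; infer_instance

-- ===== CLAIM (what is proved, stated in full; the proofs are below) =====
def Claim_equal_pick_window_for_year_py : Prop := ∀ (payload : List (String × List (List (String × Int)))) (year : Int), Dom_pick_window_for_year_py payload year → Pre_pick_window_for_year_py payload year → Spec_pick_window_for_year_py payload year (pick_window_for_year_py payload year)

-- ===== LEMMAS AND PROOFS =====

-- first-argmin fold: keeps the FIRST element minimal under the strict relation lt
def pvF {α : Type} (lt : α → α → Bool) (xs : List α) (acc : Option α) : Option α :=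
  xs.foldl (fun o x => match o with
    | none => some x
    | some y => if lt x y then some x else some y) acc

theorem pvF_cons_none {α : Type} (lt : α → α → Bool) (x : α) (xs : List α) :
    pvF lt (x :: xs) none = pvF lt xs (some x) := rfl

theorem pvF_cons_some {α : Type} (lt : α → α → Bool) (x : α) (xs : List α) (y : α) :
    pvF lt (x :: xs) (some y) = pvF lt xs (if lt x y then some x else some y) := rfl

theorem pvHead?_insertBy {α : Type} (before : α → α → Bool) (x : α) (l : List α) :
    (PySem.List.insertBy before x l).head? =
      (match l with
       | [] => some x
       | y :: _ => if before x y then some x else some y) := by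
  cases l with
  | nil => simp [PySem.List.insertBy]
  | cons y ys =>
    simp only [PySem.List.insertBy]
    split <;> simp

theorem pvHead?_foldl_insertBy {α : Type} (before : α → α → Bool) :
    ∀ (xs : List α) (acc : List α),
      (xs.foldl (fun a x => PySem.List.insertBy before x a) acc).head? =
        pvF before xs acc.head? := by
  intro xs
  induction xs with
  | nil => intro acc; rfl
  | cons x xs ih =>
    intro acc
    rw [List.foldl_cons, ih, pvHead?_insertBy]
    cases acc <;> rfl

theorem pvHead?_sorted2 {α : Type} (xs : List α) (k1 k2 : α → Int) :
    (PySem.List.sorted2 xs k1 k2 false).head? =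
      pvF (fun a b => decide (k1 a < k1 b) || (!decide (k1 b < k1 a) && decide (k2 a < k2 b))) xs none := by
  simp only [PySem.List.sorted2]
  exact pvHead?_foldl_insertBy _ xs []

-- the two lexicographic tie tests ('=' vs '¬>') agree
theorem pvLex2_eq (a b c d : Int) :
    (decide (a < c) || (decide (a = c) && decide (b < d))) =
      (decide (a < c) || (!decide (c < a) && decide (b < d))) := by
  by_cases h1 : a < c <;> by_cases h2 : a = c <;> by_cases h3 : c < a <;> simp_all <;> omega

theorem pvF_congr {α : Type} (lt lt' : α → α → Bool) :
    ∀ (xs : List α) (acc : Option α),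
      (∀ x ∈ xs, ∀ y ∈ xs, lt x y = lt' x y) →
      (∀ m, acc = some m → ∀ x ∈ xs, lt x m = lt' x m) →
      pvF lt xs acc = pvF lt' xs acc := by
  intro xs
  induction xs with
  | nil => intro acc _ _; rfl
  | cons x xs ih =>
    intro acc hall hacc
    have htail : ∀ a ∈ xs, ∀ b ∈ xs, lt a b = lt' a b := by
      intro a ha b hb; exact hall a (by simp [ha]) b (by simp [hb])
    cases acc with
    | none =>
      rw [pvF_cons_none, pvF_cons_none]
      apply ih (some x) htail
      intro m hm a ha
      simp only [Option.some.injEq] at hm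
      subst hm
      exact hall a (by simp [ha]) x (by simp)
    | some m =>
      rw [pvF_cons_some, pvF_cons_some, hacc m rfl x (by simp)]
      by_cases hc : lt' x m = true
      · simp only [hc, if_true]
        apply ih (some x) htail
        intro m' hm' a ha
        simp only [Option.some.injEq] at hm'
        subst hm'
        exact hall a (by simp [ha]) x (by simp)
      · simp only [hc]
        apply ih (some m) htail
        intro m' hm' a ha
        simp only [Option.some.injEq] at hm'
        subst hm'
        exact hacc m rfl a (by simp [ha])

theorem pvF_filter_of_P {α : Type} (lt : α → α → Bool) (P : α → Bool)
    (hQP : ∀ x y, P x = false → P y = true → lt x y = false) :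
    ∀ (xs : List α) (m : α), P m = true →
      pvF lt xs (some m) = pvF lt (xs.filter P) (some m) := by
  intro xs
  induction xs with
  | nil => intro m _; rfl
  | cons x xs ih =>
    intro m hm
    by_cases hx : P x = true
    · rw [pvF_cons_some, List.filter_cons_of_pos hx, pvF_cons_some]
      by_cases hlt : lt x m
      · simp only [hlt, if_true]; exact ih x hx
      · simp only [hlt]; exact ih m hm
    · have hx' : P x = false := by simpa using hx
      rw [pvF_cons_some, List.filter_cons_of_neg (by simp [hx'])]
      simp only [hQP x m hx' hm]
      exact ih m hm

theorem pvF_dominant {α : Type} (lt : α → α → Bool) (P : α → Bool)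
    (hPQ : ∀ x y, P x = true → P y = false → lt x y = true)
    (hQP : ∀ x y, P x = false → P y = true → lt x y = false) :
    ∀ (xs : List α) (acc : Option α),
      (∀ m, acc = some m → P m = false) → xs.filter P ≠ [] →
      pvF lt xs acc = pvF lt (xs.filter P) none := by
  intro xs
  induction xs with
  | nil => intro acc _ h; simp at h
  | cons x xs ih =>
    intro acc hacc hne
    by_cases hx : P x = true
    · rw [List.filter_cons_of_pos hx, pvF_cons_none]
      have hstep : pvF lt (x :: xs) acc = pvF lt xs (some x) := by
        cases acc with
        | none => rw [pvF_cons_none]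
        | some m => rw [pvF_cons_some]; simp [hPQ x m hx (hacc m rfl)]
      rw [hstep]
      exact pvF_filter_of_P lt P hQP xs x hx
    · have hx' : P x = false := by simpa using hx
      rw [List.filter_cons_of_neg (by simp [hx'])]
      have hne' : xs.filter P ≠ [] := by
        rw [List.filter_cons_of_neg (by simp [hx'])] at hne
        exact hne
      cases acc with
      | none =>
        rw [pvF_cons_none]
        apply ih (some x) _ hne'
        intro m hm; simp only [Option.some.injEq] at hm; subst hm; exact hx'
      | some m0 =>
        rw [pvF_cons_some]
        by_cases hlt : lt x m0
        · simp only [hlt, if_true]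
          apply ih (some x) _ hne'
          intro m hm; simp only [Option.some.injEq] at hm; subst hm; exact hx'
        · simp only [hlt]
          apply ih (some m0) _ hne'
          intro m hm; simp only [Option.some.injEq] at hm; subst hm; exact hacc m0 rfl

-- B's pair-carrying fold is pvF with the composite key, projected
theorem pvAltFold_eq (year : Int) :
    ∀ (xs : List (List (String × Int))) (acc : Option (List (String × Int))),
      xs.foldl (pvStepB year) (acc.map (fun m => (m, pvKeyB year m))) =
      (pvF (fun x y => pvLt3 (pvKeyB year x) (pvKeyB year y)) xs acc).map (fun m => (m, pvKeyB year m)) := by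
  intro xs
  induction xs with
  | nil => intro acc; rfl
  | cons x xs ih =>
    intro acc
    rw [List.foldl_cons]
    cases acc with
    | none => rw [pvF_cons_none]; exact ih (some x)
    | some m =>
      rw [pvF_cons_some]
      simp only [Option.map_some, pvStepB]
      by_cases hlt : pvLt3 (pvKeyB year x) (pvKeyB year m)
      · simp only [hlt, if_true]
        exact ih (some x)
      · simp only [hlt]
        exact ih (some m)

theorem pvAlt_eq_pvF (payload : List (String × List (List (String × Int)))) (year : Int) :
    pick_window_for_year_py_alt payload year =
      pvF (fun x y => pvLt3 (pvKeyB year x) (pvKeyB year y))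
        (((PySem.Dict.mk payload).get? "windows").getD []) none := by
  have h := pvAltFold_eq year (((PySem.Dict.mk payload).get? "windows").getD []) none
  simp only [Option.map_none] at h
  simp only [pick_window_for_year_py_alt]
  rw [h]
  cases pvF (fun x y => pvLt3 (pvKeyB year x) (pvKeyB year y))
      (((PySem.Dict.mk payload).get? "windows").getD []) none <;> rfl

theorem pvEnd_eq (w : List (String × Int)) : pvEnd w = pvGetI w "end" := by
  unfold pvEnd; split <;> omega

theorem pvKeyB_cov (year : Int) (w : List (String × Int)) (h : pvCov year w = true) :
    pvKeyB year w = (0, pvGetI w "end" - pvGetI w "start", -pvGetI w "start") := by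
  unfold pvCov at h
  rw [pvEnd_eq] at h
  simp only [Bool.and_eq_true, decide_eq_true_eq] at h
  unfold pvKeyB
  simp [h.1, h.2]

theorem pvKeyB_noncov (year : Int) (w : List (String × Int)) (h : pvCov year w = false) :
    pvKeyB year w = (1, if year < pvGetI w "start" then pvGetI w "start" - year
                        else year - pvGetI w "end", -pvGetI w "start") := by
  unfold pvCov at h
  rw [pvEnd_eq] at h
  simp only [Bool.and_eq_false_iff, decide_eq_false_iff_not, not_le] at h
  unfold pvKeyB
  have : ¬ (pvGetI w "start" ≤ year ∧ year ≤ pvGetI w "end") := by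
    rcases h with h | h <;> omega
  simp [this]

theorem pvDist_noncov (year : Int) (w : List (String × Int)) (h : pvCov year w = false) :
    pvDist year w = (if year < pvGetI w "start" then pvGetI w "start" - year
                     else year - pvGetI w "end") := by
  unfold pvCov at h
  rw [pvEnd_eq] at h
  simp only [Bool.and_eq_false_iff, decide_eq_false_iff_not, not_le] at h
  unfold pvDist
  rw [pvEnd_eq]
  rcases h with h | h
  · simp [h]
  · by_cases hc : year < pvGetI w "start"
    · simp [hc]
    · simp [hc, h]

-- ===== VERDICT (by name: the statement is the Claim_ definition above) =====
theorem pick_window_for_year_py_spec : Claim_equal_pick_window_for_year_py := by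
  intro payload year _ _
  unfold Spec_pick_window_for_year_py
  rw [pvAlt_eq_pvF]
  unfold pick_window_for_year_py
  set wins := ((PySem.Dict.mk payload).get? "windows").getD [] with hwins
  by_cases hnil : wins = []
  · simp [hnil, pvF]
  · simp only [hnil, if_false]
    set covering := wins.filter (fun w => pvCov year w) with hcov
    by_cases hce : covering = []
    · -- no covering window: every window is non-covering; B's flag is 1 everywhere
      simp only [hce, if_true]
      rw [pvHead?_sorted2]
      have hnc : ∀ w ∈ wins, pvCov year w = false := by
        intro w hw
        cases hval : pvCov year w
        · rfl
        · exfalso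
          have hmem : w ∈ covering := by
            rw [hcov]; exact List.mem_filter.mpr ⟨hw, hval⟩
          rw [hce] at hmem; simp at hmem
      symm
      apply pvF_congr
      · intro x hx y hy
        beta_reduce
        rw [pvKeyB_noncov year x (hnc x hx), pvKeyB_noncov year y (hnc y hy)]
        rw [pvDist_noncov year x (hnc x hx), pvDist_noncov year y (hnc y hy)]
        simp only [pvLt3]
        rw [← pvLex2_eq]
        simp
      · intro m hm; simp at hm
    · -- some covering window: B's flag-0 group dominates and matches A's covering sort
      simp only [hce, if_false]
      rw [pvHead?_sorted2]
      have hdom := pvF_dominant (fun x y => pvLt3 (pvKeyB year x) (pvKeyB year y))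
        (fun w => pvCov year w)
        (by
          intro x y hx hy
          beta_reduce
          rw [pvKeyB_cov year x hx, pvKeyB_noncov year y hy]
          simp [pvLt3])
        (by
          intro x y hx hy
          beta_reduce
          rw [pvKeyB_noncov year x hx, pvKeyB_cov year y hy]
          simp [pvLt3])
        wins none (by intro m hm; simp at hm) (by rw [← hcov]; exact hce)
      rw [← hcov] at hdom
      rw [hdom]
      symm
      apply pvF_congr
      · intro x hx y hy
        have hx' : pvCov year x = true := (List.mem_filter.mp (hcov ▸ hx)).2
        have hy' : pvCov year y = true := (List.mem_filter.mp (hcov ▸ hy)).2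
        rw [pvKeyB_cov year x hx', pvKeyB_cov year y hy']
        rw [pvEnd_eq x, pvEnd_eq y]
        simp only [pvLt3]
        rw [← pvLex2_eq]
        simp
      · intro m hm; simp at hm
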